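-- pv_equiv track=rewrite | github.com/mupozg823/codelens-mcp-plugin | benchmarks/paper-benchmark.py | choose_source_kind
-- ===== SOURCE A (Python) =====
-- from collections import Counter
--
-- def choose_source_kind(entries: list[dict], requested: str) -> tuple[str, list[dict], dict]:
--     counts = Counter(entry.get("source_kind", "unknown") for entry in entries)
--     if requested != "auto":
--         if requested == "all":
--             return "all", entries, dict(counts)
--         selected = [entry for entry in entries if entry.get("source_kind") == requested]
--         if not selected:
--             raise SystemExit(f"no harness entries matched source_kind={requested}")
--         return requested, selected, dict(counts)
--     if counts.get("real-session"):
--         return (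
--             "real-session",
--             [entry for entry in entries if entry.get("source_kind") == "real-session"],
--             dict(counts),
--         )
--     if counts.get("synthetic"):
--         return (
--             "synthetic",
--             [entry for entry in entries if entry.get("source_kind") == "synthetic"],
--             dict(counts),
--         )
--     if not entries:
--         raise SystemExit("no harness entries matched the requested filters")
--     return "all", entries, dict(counts)
-- ===== SOURCE B (Python) =====
-- def choose_source_kind(entries: list[dict], requested: str) -> tuple[str, list[dict], dict]:
--     # One pass: group entries by their raw source_kind and count labels simultaneously;
--     # every branch is then answered by a dictionary lookup instead of a filter pass.
--     groups = {}
--     counts = {}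
--     for entry in entries:
--         kind = entry.get("source_kind")
--         groups[kind] = groups.get(kind, []) + [entry]
--         label = "unknown" if kind is None else kind
--         counts[label] = counts.get(label, 0) + 1
--     if requested == "all":
--         return "all", entries, counts
--     if requested != "auto":
--         selected = groups.get(requested, [])
--         if not selected:
--             raise SystemExit(f"no harness entries matched source_kind={requested}")
--         return requested, selected, counts
--     real = groups.get("real-session", [])
--     if real:
--         return "real-session", real, counts
--     synth = groups.get("synthetic", [])
--     if synth:
--         return "synthetic", synth, counts
--     if not entries:
--         raise SystemExit("no harness entries matched the requested filters")
--     return "all", entries, counts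
-- ===== Notes on version B (the rewrite author's own statement) =====
-- stated objective: alternative
-- what changed: B makes a single pass that groups entries by raw source_kind and counts labels at the same time, then answers every branch by a dictionary lookup, replacing A's per-branch list-comprehension filter passes over entries.
import Mathlib
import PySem

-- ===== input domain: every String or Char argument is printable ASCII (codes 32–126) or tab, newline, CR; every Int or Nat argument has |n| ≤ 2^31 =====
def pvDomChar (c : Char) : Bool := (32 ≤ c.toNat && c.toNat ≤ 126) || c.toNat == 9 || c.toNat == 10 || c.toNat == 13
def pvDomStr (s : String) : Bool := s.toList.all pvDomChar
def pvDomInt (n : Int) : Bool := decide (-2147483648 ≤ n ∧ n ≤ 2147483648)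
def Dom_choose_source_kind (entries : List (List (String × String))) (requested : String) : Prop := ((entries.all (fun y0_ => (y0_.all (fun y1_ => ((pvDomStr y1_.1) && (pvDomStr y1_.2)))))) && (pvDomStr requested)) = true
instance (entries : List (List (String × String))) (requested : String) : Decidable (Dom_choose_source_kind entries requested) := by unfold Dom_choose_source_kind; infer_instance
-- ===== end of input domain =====

-- B replaces A's per-branch filter passes by one grouping-and-counting pass plus lookups (objective: alternative).
-- Where Python raises SystemExit (outside Pre_) both ports return the sentinel ("", [], []).

-- Python truthiness of counts.get(k) : Option Int (None and 0 are falsy)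
def pyTruthyInt (o : Option Int) : Bool :=
  match o with
  | none => false
  | some n => n != 0

-- ===== PORT A =====
def choose_source_kind (entries : List (List (String × String))) (requested : String) : String × (List (List (String × String))) × (List (String × Int)) :=
  -- counts = Counter(entry.get("source_kind", "unknown") for entry in entries)
  let counts := PySem.Dict.counter (entries.map (fun e => (PySem.Dict.mk e).getD "source_kind" "unknown"))
  if requested != "auto" then
    if requested == "all" then ("all", entries, counts.items)
    else
      let selected := entries.filter (fun e => (PySem.Dict.mk e).get? "source_kind" == some requested)
      if selected.isEmpty then ("", [], [])  -- raise SystemExit (excluded by Pre_)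
      else (requested, selected, counts.items)
  else
    if pyTruthyInt (counts.get? "real-session") then
      ("real-session", entries.filter (fun e => (PySem.Dict.mk e).get? "source_kind" == some "real-session"), counts.items)
    else if pyTruthyInt (counts.get? "synthetic") then
      ("synthetic", entries.filter (fun e => (PySem.Dict.mk e).get? "source_kind" == some "synthetic"), counts.items)
    else if entries.isEmpty then ("", [], [])  -- raise SystemExit (excluded by Pre_)
    else ("all", entries, counts.items)

-- ===== PORT B =====
def choose_source_kind_alt (entries : List (List (String × String))) (requested : String) : String × (List (List (String × String))) × (List (String × Int)) :=
  -- one pass: groups keyed by the raw entry.get("source_kind") (Option String), counts keyed by the label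
  let st := entries.foldl
    (fun (st : PySem.Dict (Option String) (List (List (String × String))) × PySem.Dict String Int) e =>
      let kind := (PySem.Dict.mk e).get? "source_kind"
      let label := kind.getD "unknown"   -- "unknown" if kind is None else kind
      (st.1.modify kind [] (· ++ [e]), st.2.insert label (st.2.getD label 0 + 1)))
    (PySem.Dict.empty, PySem.Dict.empty)
  let groups := st.1
  let counts := st.2
  if requested == "all" then ("all", entries, counts.items)
  else if requested != "auto" then
    let selected := groups.getD (some requested) []
    if selected.isEmpty then ("", [], [])  -- raise SystemExit (excluded by Pre_)
    else (requested, selected, counts.items)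
  else
    let real := groups.getD (some "real-session") []
    if !real.isEmpty then ("real-session", real, counts.items)
    else
      let synth := groups.getD (some "synthetic") []
      if !synth.isEmpty then ("synthetic", synth, counts.items)
      else if entries.isEmpty then ("", [], [])  -- raise SystemExit (excluded by Pre_)
      else ("all", entries, counts.items)

-- ===== PRECONDITION & SPEC =====
-- Pre_ excludes exactly the inputs where A raises SystemExit: a specific requested kind matched
-- by no entry, and requested = "auto" with an empty entries list (B raises there too).
def Pre_choose_source_kind (entries : List (List (String × String))) (requested : String) : Prop :=
  (requested ≠ "auto" → requested ≠ "all" → ∃ e ∈ entries, (PySem.Dict.mk e).get? "source_kind" = some requested) ∧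
  (requested = "auto" → entries ≠ [])
instance (entries : List (List (String × String))) (requested : String) : Decidable (Pre_choose_source_kind entries requested) := by unfold Pre_choose_source_kind; infer_instance

def pvWitness_choose_source_kind : (List (List (String × String))) × String :=
  ([[("source_kind", "real-session")], [("id", "x")]], "auto")

def Spec_choose_source_kind (entries : List (List (String × String))) (requested : String) (out : String × (List (List (String × String))) × (List (String × Int))) : Prop := out = choose_source_kind_alt entries requested
instance (entries : List (List (String × String))) (requested : String) (out : String × (List (List (String × String))) × (List (String × Int))) : Decidable (Spec_choose_source_kind entries requested out) := by unfold Spec_choose_source_kind; infer_instance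

-- ===== CLAIM (what is proved, stated in full; the proofs are below) =====
def Claim_equal_choose_source_kind : Prop := ∀ (entries : List (List (String × String))) (requested : String), Dom_choose_source_kind entries requested → Pre_choose_source_kind entries requested → Spec_choose_source_kind entries requested (choose_source_kind entries requested)

-- ===== LEMMAS AND PROOFS =====

-- B's count accumulator equals A's Counter of the mapped labels.
theorem pv_counts_eq (entries : List (List (String × String))) :
    entries.foldl (fun (d : PySem.Dict String Int) e =>
        d.insert (((PySem.Dict.mk e).get? "source_kind").getD "unknown")
          (d.getD (((PySem.Dict.mk e).get? "source_kind").getD "unknown") 0 + 1)) PySem.Dict.empty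
      = PySem.Dict.counter (entries.map (fun e => (PySem.Dict.mk e).getD "source_kind" "unknown")) := by
  rw [← PySem.Dict.foldl_insert_getD_add_one_eq_counter, List.foldl_map]
  simp only [← PySem.Dict.getD_eq_get?_getD]

-- B's group bucket for key c is exactly A's filter of entries whose raw source_kind is c.
theorem pv_groups_getD (entries : List (List (String × String))) (c : Option String) :
    (entries.foldl (fun (d : PySem.Dict (Option String) (List (List (String × String)))) e =>
        d.modify ((PySem.Dict.mk e).get? "source_kind") [] (· ++ [e])) PySem.Dict.empty).getD c []
      = entries.filter (fun e => (PySem.Dict.mk e).get? "source_kind" == c) := by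
  have h : entries.foldl (fun (d : PySem.Dict (Option String) (List (List (String × String)))) e =>
        d.modify ((PySem.Dict.mk e).get? "source_kind") [] (· ++ [e])) PySem.Dict.empty
      = (entries.map (fun e => ((PySem.Dict.mk e).get? "source_kind", e))).foldl
          (fun d p => d.modify p.1 [] (· ++ [p.2])) PySem.Dict.empty := by
    rw [List.foldl_map]
  rw [h, PySem.Dict.getD_foldl_modify_append]
  simp [List.filter_map, List.map_map, Function.comp_def]

-- Truthiness of A's Counter lookup at s ≠ "unknown" is non-emptiness of the raw-kind filter.
theorem pv_auto_check (entries : List (List (String × String))) (s : String) (hs : s ≠ "unknown") :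
    pyTruthyInt ((PySem.Dict.counter (entries.map (fun e => (PySem.Dict.mk e).getD "source_kind" "unknown"))).get? s)
      = !(entries.filter (fun e => (PySem.Dict.mk e).get? "source_kind" == (some s : Option String))).isEmpty := by
  have hcount : (entries.map (fun e => (PySem.Dict.mk e).getD "source_kind" "unknown")).count s
      = (entries.filter (fun e => (PySem.Dict.mk e).get? "source_kind" == (some s : Option String))).length := by
    rw [List.count_eq_countP, List.countP_map, ← List.countP_eq_length_filter]
    apply List.countP_congr
    intro e _
    simp only [Function.comp_def, PySem.Dict.getD_eq_get?_getD]
    cases h : (PySem.Dict.mk e).get? "source_kind" with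
    | none => simp; exact fun hh => absurd hh.symm hs
    | some v => simp
  cases h : (PySem.Dict.counter (entries.map (fun e => (PySem.Dict.mk e).getD "source_kind" "unknown"))).get? s with
  | none =>
    have h0 := PySem.Dict.getD_of_get?_eq_none (PySem.Dict.counter (entries.map (fun e => (PySem.Dict.mk e).getD "source_kind" "unknown"))) (0:Int) h
    rw [PySem.Dict.getD_counter, hcount] at h0
    have hnil : (entries.filter (fun e => (PySem.Dict.mk e).get? "source_kind" == (some s : Option String))) = [] :=
      List.length_eq_zero_iff.mp (by exact_mod_cast h0)
    simp [pyTruthyInt, hnil]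
  | some n =>
    have h0 := PySem.Dict.getD_of_get?_eq_some (PySem.Dict.counter (entries.map (fun e => (PySem.Dict.mk e).getD "source_kind" "unknown"))) (0:Int) h
    rw [PySem.Dict.getD_counter, hcount] at h0
    cases hL : (entries.filter (fun e => (PySem.Dict.mk e).get? "source_kind" == (some s : Option String))) with
    | nil => rw [hL] at h0; simp at h0; simp [pyTruthyInt, h0]
    | cons x t =>
      rw [hL] at h0
      have hn : n ≠ 0 := by simp at h0; omega
      simp [pyTruthyInt, hn]


-- B's paired fold splits into the groups fold and the counts fold (which is A's Counter).
theorem pv_fold_eq (entries : List (List (String × String))) :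
    entries.foldl
      (fun (st : PySem.Dict (Option String) (List (List (String × String))) × PySem.Dict String Int) e =>
        (st.1.modify ((PySem.Dict.mk e).get? "source_kind") [] (· ++ [e]),
         st.2.insert (((PySem.Dict.mk e).get? "source_kind").getD "unknown")
           (st.2.getD (((PySem.Dict.mk e).get? "source_kind").getD "unknown") 0 + 1)))
      (PySem.Dict.empty, PySem.Dict.empty)
    = (entries.foldl (fun (d : PySem.Dict (Option String) (List (List (String × String)))) e =>
          d.modify ((PySem.Dict.mk e).get? "source_kind") [] (· ++ [e])) PySem.Dict.empty,
       PySem.Dict.counter (entries.map (fun e => (PySem.Dict.mk e).getD "source_kind" "unknown"))) := by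
  have h := PySem.List.foldl_prod_mk
    (fun (d : PySem.Dict (Option String) (List (List (String × String)))) (e : List (String × String)) =>
      d.modify ((PySem.Dict.mk e).get? "source_kind") [] (· ++ [e]))
    (fun (d : PySem.Dict String Int) (e : List (String × String)) =>
      d.insert (((PySem.Dict.mk e).get? "source_kind").getD "unknown")
        (d.getD (((PySem.Dict.mk e).get? "source_kind").getD "unknown") 0 + 1))
    entries PySem.Dict.empty PySem.Dict.empty
  rw [pv_counts_eq] at h
  exact h

-- ===== VERDICT (by name: the statement is the Claim_ definition above) =====
theorem choose_source_kind_spec : Claim_equal_choose_source_kind := by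
  intro entries requested _hdom _hpre
  unfold Spec_choose_source_kind
  simp only [choose_source_kind, choose_source_kind_alt, pv_fold_eq]
  simp only [pv_groups_getD]
  rw [pv_auto_check entries "real-session" (by decide), pv_auto_check entries "synthetic" (by decide)]
  by_cases h1 : requested = "all"
  · simp [h1]
  · by_cases h2 : requested = "auto"
    · simp [h2]
    · simp [h1, h2]
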